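-- pv_equiv track=rewrite | github.com/ece324-2019/RE-SEARCH | demo/customer_helpers.py | make_givelist
-- ===== SOURCE A (Python) =====
-- def make_givelist(L):
--     arg = []
--     params = ""
--     type = [['color=',[['black'],['blue','cyan','ocean'],['red','pomegranate'],['green','forest','olive'],['yellow','egg','sun'],['white','beige','neutral'],['orange','sunset']]],
--             ['neckline=', [["crew","round","scoop"], ["square","square-neck","square-necks","flat"], ["turtle","turtleneck","turtlenecks"], ["v-neck","v"]]],
--             ['sleeves=', [["long"], ["short"], ["sleeveless"]]],
--             ['buttons=',[["buttons", 'button']]]]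
--
--     for i in range(0,len(L)):
--         for j in range(0,len(type)):
--             for k in range(0,len(type[j][1])):
--                 for a in range(0,len(type[j][1][k])):
--                     if L[i] == type[j][1][k][a]:
--                         temp = type[j][0] + "'" + type[j][1][k][0] + "'"
--                         params += type[j][0][0:-1] + '_confidence' + ' * '
--                         arg += [temp]
--     params = params[0:-3]
--     return arg,params
-- ===== SOURCE B (Python) =====
-- def make_givelist(L):
--     # Build a word -> (arg string, confidence name) index once, then a single pass over L.
--     table = [['color=',[['black'],['blue','cyan','ocean'],['red','pomegranate'],['green','forest','olive'],['yellow','egg','sun'],['white','beige','neutral'],['orange','sunset']]],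
--              ['neckline=', [["crew","round","scoop"], ["square","square-neck","square-necks","flat"], ["turtle","turtleneck","turtlenecks"], ["v-neck","v"]]],
--              ['sleeves=', [["long"], ["short"], ["sleeveless"]]],
--              ['buttons=',[["buttons", 'button']]]]
--     word2info = {}
--     for prefix, groups in table:
--         conf = prefix[:-1] + '_confidence'
--         for group in groups:
--             info = (prefix + "'" + group[0] + "'", conf)
--             for w in group:
--                 word2info[w] = info
--     arg = []
--     parts = []
--     for w in L:
--         info = word2info.get(w)
--         if info is not None:
--             arg.append(info[0])
--             parts.append(info[1])
--     return arg, " * ".join(parts)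
-- ===== Notes on version B (the rewrite author's own statement) =====
-- stated objective: faster
-- what changed: A scans the whole nested synonym table (four nested loops) for every element of L; B builds a word-to-(arg,confidence) dictionary from the table once and then makes a single pass over L with one hash lookup per word, collecting the params fragments in a list joined with ' * ' instead of string-slicing a trailing separator.
import Mathlib
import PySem

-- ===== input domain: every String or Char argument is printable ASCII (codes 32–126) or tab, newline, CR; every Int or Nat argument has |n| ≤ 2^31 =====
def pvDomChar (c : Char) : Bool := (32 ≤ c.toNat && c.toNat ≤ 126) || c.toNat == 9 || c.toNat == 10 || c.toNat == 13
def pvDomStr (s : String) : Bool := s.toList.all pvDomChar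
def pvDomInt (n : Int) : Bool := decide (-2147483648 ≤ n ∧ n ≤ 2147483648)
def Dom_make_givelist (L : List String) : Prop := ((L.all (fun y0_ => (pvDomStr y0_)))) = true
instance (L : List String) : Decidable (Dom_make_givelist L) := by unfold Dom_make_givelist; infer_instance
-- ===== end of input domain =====

-- B replaces A's per-word scan of the whole nested synonym table by a word→info dictionary built once, then a single pass over L (measured faster; return value proved equal).

-- ===== PORT A =====
def tableA : List (String × List (List String)) :=
  [("color=", [["black"], ["blue", "cyan", "ocean"], ["red", "pomegranate"], ["green", "forest", "olive"], ["yellow", "egg", "sun"], ["white", "beige", "neutral"], ["orange", "sunset"]]),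
   ("neckline=", [["crew", "round", "scoop"], ["square", "square-neck", "square-necks", "flat"], ["turtle", "turtleneck", "turtlenecks"], ["v-neck", "v"]]),
   ("sleeves=", [["long"], ["short"], ["sleeveless"]]),
   ("buttons=", [["buttons", "button"]])]

-- body of A's three inner loops over the constant synonym table, for one word L[i]
def stepA (s : List String × String) (w : String) : List String × String :=
  (PySem.List.pyRange 0 (tableA.length : Int) 1).foldl (fun s j =>
    let tj := PySem.List.pyGetD tableA j ("", [])
    (PySem.List.pyRange 0 (tj.2.length : Int) 1).foldl (fun s k =>
      let g := PySem.List.pyGetD tj.2 k []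
      (PySem.List.pyRange 0 (g.length : Int) 1).foldl (fun s a =>
        if w == PySem.List.pyGetD g a "" then
          let temp := tj.1 ++ "'" ++ PySem.List.pyGetD g 0 "" ++ "'"
          (s.1 ++ [temp], s.2 ++ (PySem.Str.slice tj.1 (some 0) (some (-1)) ++ "_confidence" ++ " * "))
        else s) s) s) s

def make_givelist (L : List String) : List String × String :=
  let r := (PySem.List.pyRange 0 (L.length : Int) 1).foldl
    (fun s i => stepA s (PySem.List.pyGetD L i "")) ([], "")
  (r.1, PySem.Str.slice r.2 (some 0) (some (-3)))

-- ===== PORT B =====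
def tableB : List (String × List (List String)) :=
  [("color=", [["black"], ["blue", "cyan", "ocean"], ["red", "pomegranate"], ["green", "forest", "olive"], ["yellow", "egg", "sun"], ["white", "beige", "neutral"], ["orange", "sunset"]]),
   ("neckline=", [["crew", "round", "scoop"], ["square", "square-neck", "square-necks", "flat"], ["turtle", "turtleneck", "turtlenecks"], ["v-neck", "v"]]),
   ("sleeves=", [["long"], ["short"], ["sleeveless"]]),
   ("buttons=", [["buttons", "button"]])]

-- word → (arg string, confidence name) index, built once from the table
def w2i : PySem.Dict String (String × String) :=
  tableB.foldl (fun d p =>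
    let conf := PySem.Str.slice p.1 (some 0) (some (-1)) ++ "_confidence"
    p.2.foldl (fun d g =>
      let info := (p.1 ++ "'" ++ PySem.List.pyGetD g 0 "" ++ "'", conf)
      g.foldl (fun d w => d.insert w info) d) d) PySem.Dict.empty

def stepB (s : List String × List String) (w : String) : List String × List String :=
  match w2i.get? w with
  | some info => (s.1 ++ [info.1], s.2 ++ [info.2])
  | none => s

def make_givelist_alt (L : List String) : List String × String :=
  let b := L.foldl stepB ([], [])
  (b.1, PySem.Str.join " * " b.2)

-- ===== PRECONDITION & SPEC =====
def Spec_make_givelist (L : List String) (out : List String × String) : Prop := out = make_givelist_alt L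
instance (L : List String) (out : List String × String) : Decidable (Spec_make_givelist L out) := by unfold Spec_make_givelist; infer_instance

-- ===== CLAIM (what is proved, stated in full; the proofs are below) =====
def Claim_equal_make_givelist : Prop := ∀ (L : List String), Dom_make_givelist L → Spec_make_givelist L (make_givelist L)

-- ===== LEMMAS AND PROOFS =====

-- the dictionary B builds, as a literal association list (pure unfolding; proof is rfl)
set_option maxRecDepth 100000 in
set_option maxHeartbeats 2000000 in
lemma w2i_eq : w2i = PySem.Dict.mk
  [("black", ("color='black'", "color_confidence")),
   ("blue", ("color='blue'", "color_confidence")),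
   ("cyan", ("color='blue'", "color_confidence")),
   ("ocean", ("color='blue'", "color_confidence")),
   ("red", ("color='red'", "color_confidence")),
   ("pomegranate", ("color='red'", "color_confidence")),
   ("green", ("color='green'", "color_confidence")),
   ("forest", ("color='green'", "color_confidence")),
   ("olive", ("color='green'", "color_confidence")),
   ("yellow", ("color='yellow'", "color_confidence")),
   ("egg", ("color='yellow'", "color_confidence")),
   ("sun", ("color='yellow'", "color_confidence")),
   ("white", ("color='white'", "color_confidence")),
   ("beige", ("color='white'", "color_confidence")),
   ("neutral", ("color='white'", "color_confidence")),
   ("orange", ("color='orange'", "color_confidence")),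
   ("sunset", ("color='orange'", "color_confidence")),
   ("crew", ("neckline='crew'", "neckline_confidence")),
   ("round", ("neckline='crew'", "neckline_confidence")),
   ("scoop", ("neckline='crew'", "neckline_confidence")),
   ("square", ("neckline='square'", "neckline_confidence")),
   ("square-neck", ("neckline='square'", "neckline_confidence")),
   ("square-necks", ("neckline='square'", "neckline_confidence")),
   ("flat", ("neckline='square'", "neckline_confidence")),
   ("turtle", ("neckline='turtle'", "neckline_confidence")),
   ("turtleneck", ("neckline='turtle'", "neckline_confidence")),
   ("turtlenecks", ("neckline='turtle'", "neckline_confidence")),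
   ("v-neck", ("neckline='v-neck'", "neckline_confidence")),
   ("v", ("neckline='v-neck'", "neckline_confidence")),
   ("long", ("sleeves='long'", "sleeves_confidence")),
   ("short", ("sleeves='short'", "sleeves_confidence")),
   ("sleeveless", ("sleeves='sleeveless'", "sleeves_confidence")),
   ("buttons", ("buttons='buttons'", "buttons_confidence")),
   ("button", ("buttons='buttons'", "buttons_confidence"))] := by rfl

-- B's dictionary lookup on an arbitrary word, as an if-chain over that literal list
set_option maxRecDepth 100000 in
set_option maxHeartbeats 2000000 in
lemma get?_unfold (w : String) : w2i.get? w =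
    (if ("black" : String) == w then some (("color='black'", "color_confidence")) else
    if ("blue" : String) == w then some (("color='blue'", "color_confidence")) else
    if ("cyan" : String) == w then some (("color='blue'", "color_confidence")) else
    if ("ocean" : String) == w then some (("color='blue'", "color_confidence")) else
    if ("red" : String) == w then some (("color='red'", "color_confidence")) else
    if ("pomegranate" : String) == w then some (("color='red'", "color_confidence")) else
    if ("green" : String) == w then some (("color='green'", "color_confidence")) else
    if ("forest" : String) == w then some (("color='green'", "color_confidence")) else
    if ("olive" : String) == w then some (("color='green'", "color_confidence")) else
    if ("yellow" : String) == w then some (("color='yellow'", "color_confidence")) else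
    if ("egg" : String) == w then some (("color='yellow'", "color_confidence")) else
    if ("sun" : String) == w then some (("color='yellow'", "color_confidence")) else
    if ("white" : String) == w then some (("color='white'", "color_confidence")) else
    if ("beige" : String) == w then some (("color='white'", "color_confidence")) else
    if ("neutral" : String) == w then some (("color='white'", "color_confidence")) else
    if ("orange" : String) == w then some (("color='orange'", "color_confidence")) else
    if ("sunset" : String) == w then some (("color='orange'", "color_confidence")) else
    if ("crew" : String) == w then some (("neckline='crew'", "neckline_confidence")) else
    if ("round" : String) == w then some (("neckline='crew'", "neckline_confidence")) else
    if ("scoop" : String) == w then some (("neckline='crew'", "neckline_confidence")) else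
    if ("square" : String) == w then some (("neckline='square'", "neckline_confidence")) else
    if ("square-neck" : String) == w then some (("neckline='square'", "neckline_confidence")) else
    if ("square-necks" : String) == w then some (("neckline='square'", "neckline_confidence")) else
    if ("flat" : String) == w then some (("neckline='square'", "neckline_confidence")) else
    if ("turtle" : String) == w then some (("neckline='turtle'", "neckline_confidence")) else
    if ("turtleneck" : String) == w then some (("neckline='turtle'", "neckline_confidence")) else
    if ("turtlenecks" : String) == w then some (("neckline='turtle'", "neckline_confidence")) else
    if ("v-neck" : String) == w then some (("neckline='v-neck'", "neckline_confidence")) else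
    if ("v" : String) == w then some (("neckline='v-neck'", "neckline_confidence")) else
    if ("long" : String) == w then some (("sleeves='long'", "sleeves_confidence")) else
    if ("short" : String) == w then some (("sleeves='short'", "sleeves_confidence")) else
    if ("sleeveless" : String) == w then some (("sleeves='sleeveless'", "sleeves_confidence")) else
    if ("buttons" : String) == w then some (("buttons='buttons'", "buttons_confidence")) else
    if ("button" : String) == w then some (("buttons='buttons'", "buttons_confidence")) else
    none) := by
  rw [w2i_eq]
  simp only [PySem.Dict.get?_mk_cons]
  simp [PySem.Dict.get?]

-- one word's effect on A's state equals a single dictionary lookup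
set_option maxRecDepth 100000 in
set_option maxHeartbeats 2000000 in
lemma stepA_eq (s : List String × String) (w : String) :
    stepA s w = (match w2i.get? w with
      | some info => (s.1 ++ [info.1], s.2 ++ (info.2 ++ " * "))
      | none => s) := by
  rw [get?_unfold]
  by_cases h1 : w = "black"
  · subst h1; rfl
  by_cases h2 : w = "blue"
  · subst h2; rfl
  by_cases h3 : w = "cyan"
  · subst h3; rfl
  by_cases h4 : w = "ocean"
  · subst h4; rfl
  by_cases h5 : w = "red"
  · subst h5; rfl
  by_cases h6 : w = "pomegranate"
  · subst h6; rfl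
  by_cases h7 : w = "green"
  · subst h7; rfl
  by_cases h8 : w = "forest"
  · subst h8; rfl
  by_cases h9 : w = "olive"
  · subst h9; rfl
  by_cases h10 : w = "yellow"
  · subst h10; rfl
  by_cases h11 : w = "egg"
  · subst h11; rfl
  by_cases h12 : w = "sun"
  · subst h12; rfl
  by_cases h13 : w = "white"
  · subst h13; rfl
  by_cases h14 : w = "beige"
  · subst h14; rfl
  by_cases h15 : w = "neutral"
  · subst h15; rfl
  by_cases h16 : w = "orange"
  · subst h16; rfl
  by_cases h17 : w = "sunset"
  · subst h17; rfl
  by_cases h18 : w = "crew"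
  · subst h18; rfl
  by_cases h19 : w = "round"
  · subst h19; rfl
  by_cases h20 : w = "scoop"
  · subst h20; rfl
  by_cases h21 : w = "square"
  · subst h21; rfl
  by_cases h22 : w = "square-neck"
  · subst h22; rfl
  by_cases h23 : w = "square-necks"
  · subst h23; rfl
  by_cases h24 : w = "flat"
  · subst h24; rfl
  by_cases h25 : w = "turtle"
  · subst h25; rfl
  by_cases h26 : w = "turtleneck"
  · subst h26; rfl
  by_cases h27 : w = "turtlenecks"
  · subst h27; rfl
  by_cases h28 : w = "v-neck"
  · subst h28; rfl
  by_cases h29 : w = "v"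
  · subst h29; rfl
  by_cases h30 : w = "long"
  · subst h30; rfl
  by_cases h31 : w = "short"
  · subst h31; rfl
  by_cases h32 : w = "sleeveless"
  · subst h32; rfl
  by_cases h33 : w = "buttons"
  · subst h33; rfl
  by_cases h34 : w = "button"
  · subst h34; rfl
  have r1 : PySem.List.pyRange 0 1 1 = [0] := by decide
  have r2 : PySem.List.pyRange 0 2 1 = [0, 1] := by decide
  have r3 : PySem.List.pyRange 0 3 1 = [0, 1, 2] := by decide
  have r4 : PySem.List.pyRange 0 4 1 = [0, 1, 2, 3] := by decide
  have r7 : PySem.List.pyRange 0 7 1 = [0, 1, 2, 3, 4, 5, 6] := by decide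
  norm_num [stepA, tableA, r1, r2, r3, r4, r7, List.foldl_cons, List.foldl_nil,
    PySem.List.pyGetD_ofNat', h1, h2, h3, h4, h5, h6, h7, h8, h9, h10, h11, h12, h13, h14, h15, h16, h17, h18, h19, h20, h21, h22, h23, h24, h25, h26, h27, h28, h29, h30, h31, h32, h33, h34, Ne.symm h1, Ne.symm h2, Ne.symm h3, Ne.symm h4, Ne.symm h5, Ne.symm h6, Ne.symm h7, Ne.symm h8, Ne.symm h9, Ne.symm h10, Ne.symm h11, Ne.symm h12, Ne.symm h13, Ne.symm h14, Ne.symm h15, Ne.symm h16, Ne.symm h17, Ne.symm h18, Ne.symm h19, Ne.symm h20, Ne.symm h21, Ne.symm h22, Ne.symm h23, Ne.symm h24, Ne.symm h25, Ne.symm h26, Ne.symm h27, Ne.symm h28, Ne.symm h29, Ne.symm h30, Ne.symm h31, Ne.symm h32, Ne.symm h33, Ne.symm h34]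

-- " * "-terminated concatenation of the parts B collects
def jt : List String → String
  | [] => ""
  | p :: ps => p ++ " * " ++ jt ps

lemma jt_snoc (ps : List String) (c : String) : jt (ps ++ [c]) = jt ps ++ (c ++ " * ") := by
  induction ps with
  | nil => simp [jt]
  | cons p ps ih => simp [jt, ih, String.append_assoc]

set_option maxRecDepth 100000 in
set_option maxHeartbeats 2000000 in
lemma fold_corr (L : List String) (arg : List String) (parts : List String) :
    L.foldl stepA (arg, jt parts) =
      ((L.foldl stepB (arg, parts)).1, jt (L.foldl stepB (arg, parts)).2) := by
  induction L generalizing arg parts with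
  | nil => rfl
  | cons w L ih =>
    cases h : w2i.get? w with
    | none =>
      rw [List.foldl_cons, List.foldl_cons, stepA_eq]
      unfold stepB
      rw [h]
      exact ih arg parts
    | some info =>
      rw [List.foldl_cons, List.foldl_cons, stepA_eq]
      unfold stepB
      rw [h]
      have := ih (arg ++ [info.1]) (parts ++ [info.2])
      rw [jt_snoc] at this
      exact this

set_option maxHeartbeats 1000000 in
lemma slice_snoc_star (t : String) :
    PySem.Str.slice (t ++ " * ") (some 0) (some (-3)) = t := by
  apply String.ext
  simp only [pysem]
  rw [PySem.List.slice_to_neg_ofNat _ 3 (by omega)]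
  simp

set_option maxHeartbeats 1000000 in
lemma jt_join (p : String) (ps : List String) :
    jt (p :: ps) = PySem.Str.join " * " (p :: ps) ++ " * " := by
  induction ps generalizing p with
  | nil =>
    have h : PySem.Str.join " * " [p] = p := by
      apply String.ext; simp [pysem, PySem.Chars.join_singleton]
    simp [jt, h]
  | cons q ps ih =>
    have h : PySem.Str.join " * " (p :: q :: ps) = p ++ " * " ++ PySem.Str.join " * " (q :: ps) := by
      apply String.ext; simp [pysem, PySem.Chars.join_cons_cons]
    rw [h, show jt (p :: q :: ps) = p ++ " * " ++ jt (q :: ps) from rfl, ih q]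
    simp [String.append_assoc]

lemma jt_slice (ps : List String) :
    PySem.Str.slice (jt ps) (some 0) (some (-3)) = PySem.Str.join " * " ps := by
  cases ps with
  | nil => rfl
  | cons p ps => rw [jt_join, slice_snoc_star]

-- ===== VERDICT (by name: the statement is the Claim_ definition above) =====
theorem make_givelist_spec : Claim_equal_make_givelist := by
  intro L _
  show make_givelist L = make_givelist_alt L
  simp only [make_givelist, make_givelist_alt]
  rw [PySem.List.foldl_pyRange_zero_pyGetD']
  rw [show ("" : String) = jt [] from rfl, fold_corr L [] [], jt_slice]
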